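-- pv_equiv track=rewrite | github.com/bbugyi200/dotfiles | home/lib/gai/shared_utils.py | _normalize_research_headers
-- ===== SOURCE A (Python) =====
-- def _normalize_research_headers(content: str) -> str:
--     """
--     Normalize research agent headers to be nested properly under ### Research Findings.
--     Converts ## headers to #### headers, ### to #####, etc.
--     """
--     lines = content.split("\n")
--     normalized_lines = []
--
--     for line in lines:
--         # Add two # characters to existing headers to make them deeper
--         if line.startswith("## "):
--             normalized_lines.append("####" + line[2:])
--         elif line.startswith("### "):
--             normalized_lines.append("#####" + line[3:])
--         elif line.startswith("#### "):
--             normalized_lines.append("######" + line[4:])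
--         elif line.startswith("# "):
--             normalized_lines.append("###" + line[1:])
--         else:
--             normalized_lines.append(line)
--
--     return "\n".join(normalized_lines)
-- ===== SOURCE B (Python) =====
-- def _normalize_research_headers(content: str) -> str:
--     """One computed rule instead of four enumerated branches: count the leading
--     '#' characters; a line whose 1-4 leading hashes are followed by a space gets
--     '##' prepended (equivalent to A's per-level reconstruction)."""
--     out = []
--     for line in content.split("\n"):
--         n = 0
--         while n < len(line) and line[n] == "#":
--             n += 1
--         if 1 <= n <= 4 and line[n:n + 1] == " ":
--             out.append("##" + line)
--         else:
--             out.append(line)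
--     return "\n".join(out)
-- ===== Notes on version B (the rewrite author's own statement) =====
-- stated objective: simpler
-- what changed: Replaces A's four enumerated startswith branches that each rebuild the header at its own level with one computed rule: count the leading '#' characters and, if the count is 1-4 and a space follows, prepend '##' uniformly.
import Mathlib
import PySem

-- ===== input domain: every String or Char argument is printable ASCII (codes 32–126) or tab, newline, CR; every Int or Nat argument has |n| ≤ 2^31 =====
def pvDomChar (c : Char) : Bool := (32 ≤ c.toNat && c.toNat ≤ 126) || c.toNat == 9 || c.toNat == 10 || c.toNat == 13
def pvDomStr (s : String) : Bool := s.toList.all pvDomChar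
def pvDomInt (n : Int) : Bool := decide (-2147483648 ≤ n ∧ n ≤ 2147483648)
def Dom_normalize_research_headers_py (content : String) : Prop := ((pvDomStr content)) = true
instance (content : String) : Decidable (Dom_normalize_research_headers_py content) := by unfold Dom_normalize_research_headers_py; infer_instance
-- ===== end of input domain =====

-- B replaces A's four enumerated startswith branches with one computed leading-'#' count
-- and a uniform '##' prepend; objective: simpler (same O(n) cost).

-- ===== PORT A =====
-- per-line body of A's loop: the four startswith branches, in A's order
def pvLineA (l : List Char) : List Char :=
  if PySem.Chars.startswith l "## ".toList then "####".toList ++ PySem.List.slice l (some 2) none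
  else if PySem.Chars.startswith l "### ".toList then "#####".toList ++ PySem.List.slice l (some 3) none
  else if PySem.Chars.startswith l "#### ".toList then "######".toList ++ PySem.List.slice l (some 4) none
  else if PySem.Chars.startswith l "# ".toList then "###".toList ++ PySem.List.slice l (some 1) none
  else l

def normalize_research_headers_py (content : String) : String :=
  let lines := PySem.Chars.splitOn content.toList "\n".toList
  String.ofList (PySem.Chars.join "\n".toList (lines.map pvLineA))

-- ===== PORT B =====
-- Source B's 'while n < len(line) and line[n] == "#": n += 1' as structural recursion
-- counting the leading '#' characters (exact: the loop walks the list front-to-back)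
def pvCountHash : List Char → Nat
  | [] => 0
  | c :: t => if c = '#' then pvCountHash t + 1 else 0

-- per-line body of B's loop: computed count, uniform '##' prepend
def pvLineB (l : List Char) : List Char :=
  let n := pvCountHash l
  if 1 ≤ n ∧ n ≤ 4 ∧ PySem.List.slice l (some (n : Int)) (some ((n : Int) + 1)) = [' '] then
    "##".toList ++ l
  else l

def normalize_research_headers_py_alt (content : String) : String :=
  let lines := PySem.Chars.splitOn content.toList "\n".toList
  String.ofList (PySem.Chars.join "\n".toList (lines.map pvLineB))

-- ===== PRECONDITION & SPEC =====
def Spec_normalize_research_headers_py (content : String) (out : String) : Prop := out = normalize_research_headers_py_alt content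
instance (content : String) (out : String) : Decidable (Spec_normalize_research_headers_py content out) := by unfold Spec_normalize_research_headers_py; infer_instance

-- ===== CLAIM (what is proved, stated in full; the proofs are below) =====
def Claim_equal_normalize_research_headers_py : Prop := ∀ (content : String), Dom_normalize_research_headers_py content → Spec_normalize_research_headers_py content (normalize_research_headers_py content)

-- ===== LEMMAS AND PROOFS =====

-- line[n:n+1] at the small literal indices B can reach is take 1 of drop n
lemma pvSlice1 (l : List Char) : PySem.List.slice l (some 1) (some 2) = (l.drop 1).take 1 := by
  simpa using PySem.List.slice_natCast l 1 2
lemma pvSlice2 (l : List Char) : PySem.List.slice l (some 2) (some 3) = (l.drop 2).take 1 := by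
  simpa using PySem.List.slice_natCast l 2 3
lemma pvSlice3 (l : List Char) : PySem.List.slice l (some 3) (some 4) = (l.drop 3).take 1 := by
  simpa using PySem.List.slice_natCast l 3 4
lemma pvSlice4 (l : List Char) : PySem.List.slice l (some 4) (some 5) = (l.drop 4).take 1 := by
  simpa using PySem.List.slice_natCast l 4 5

-- the heart of the equivalence: A's four branches = B's computed rule, line by line
lemma pvLine_eq (l : List Char) : pvLineA l = pvLineB l := by
  match l with
  | [] => rfl
  | a :: t0 =>
    by_cases ha : a = '#'
    · subst ha
      match t0 with
      | [] => rfl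
      | b :: t1 =>
        by_cases hb : b = '#'
        · subst hb
          match t1 with
          | [] => rfl
          | c :: t2 =>
            by_cases hc : c = '#'
            · subst hc
              match t2 with
              | [] => rfl
              | d :: t3 =>
                by_cases hd : d = '#'
                · subst hd
                  match t3 with
                  | [] => rfl
                  | e :: t4 =>
                    by_cases he : e = '#'
                    · -- five or more leading '#': both sides leave the line unchanged
                      subst he
                      have h5 : 5 ≤ pvCountHash ('#'::'#'::'#'::'#'::'#'::t4) := by
                        simp [pvCountHash]
                      simp [pvLineA, pvLineB, PySem.Chars.startswith, List.isPrefixOf]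
                      intro h1 h2
                      omega
                    · rcases eq_or_ne e ' ' with hsp | hsp
                      · subst hsp
                        simp [pvLineA, pvLineB, pvCountHash, pvSlice4, PySem.Chars.startswith,
                          List.isPrefixOf, PySem.List.slice_from]
                      · simp [pvLineA, pvLineB, pvCountHash, pvSlice4, PySem.Chars.startswith,
                          List.isPrefixOf, he, hsp, hsp.symm]
                · rcases eq_or_ne d ' ' with hsp | hsp
                  · subst hsp
                    simp [pvLineA, pvLineB, pvCountHash, pvSlice3, PySem.Chars.startswith,
                      List.isPrefixOf, PySem.List.slice_from]
                  · simp [pvLineA, pvLineB, pvCountHash, pvSlice3, PySem.Chars.startswith,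
                      List.isPrefixOf, hd, Ne.symm hd, hsp, hsp.symm]
            · rcases eq_or_ne c ' ' with hsp | hsp
              · subst hsp
                simp [pvLineA, pvLineB, pvCountHash, pvSlice2, PySem.Chars.startswith,
                  List.isPrefixOf, PySem.List.slice_from]
              · simp [pvLineA, pvLineB, pvCountHash, pvSlice2, PySem.Chars.startswith,
                  List.isPrefixOf, hc, Ne.symm hc, hsp, hsp.symm]
        · rcases eq_or_ne b ' ' with hsp | hsp
          · subst hsp
            simp [pvLineA, pvLineB, pvCountHash, pvSlice1, PySem.Chars.startswith,
              List.isPrefixOf, PySem.List.slice_from]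
          · simp [pvLineA, pvLineB, pvCountHash, pvSlice1, PySem.Chars.startswith,
              List.isPrefixOf, hb, Ne.symm hb, hsp, hsp.symm]
    · -- no leading '#': every branch of A and B's condition are off
      simp [pvLineA, pvLineB, pvCountHash, PySem.Chars.startswith, List.isPrefixOf, ha, Ne.symm ha]

-- ===== VERDICT (by name: the statement is the Claim_ definition above) =====
theorem normalize_research_headers_py_spec : Claim_equal_normalize_research_headers_py := by
  intro content _
  unfold Spec_normalize_research_headers_py normalize_research_headers_py normalize_research_headers_py_alt
  simp only [List.map_congr_left (fun l _ => pvLine_eq l)]
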